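/-
  THE SPLITS OF decode_residue.4 AND decode_residue.6 (path A of decode_residue: the `while (pcount < part_read)` with its i-loop and
  the call of codebook_decode_deinterleave_repeat; `.4`: `ch = 2`, `r` in r14; `.6`: `ch > 2`, `r` in r12, `idiv` for `z % ch`, `z / ch`).

  The claims `DecodeResidue.Seg4` / `Seg6` of Vorbis/Spec/DecodeResidue.lean are unchanged. This file has the assertions at the cut points
  INSIDE the two segments, the children's claims and the two compositions (pure `ReachVia` logic: no code is walked here).

      segment 4  (0x10f141 … 0x10f2ec + 0x10f30c … 0x10f30f)
      AtIn a                     the invariant of the i-loop 2183 at `a` = 0x10f1a7 (`cut14`, the loop head) or 0x10f1cf (`at_10f1cf`, the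
                                 first instruction of the body, after the loop condition)
      AtB a                      inside the body, `b = residue_books[c][pass]` in ebx: `a` = 0x10f260 (`at_10f260`, `test bx, 0x8000`) or
                                 0x10f141 (`at_10f141`, the call arm, `b ≥ 0`)
      Seg4a                      EVERYTHING BUT THE CALL ARM, five walks: the `while` head (At15 → DECODE #1 | the i-loop's entry | the
                                 pass latch), the i-loop's entry (At16 → the loop head with `i = 0`), the loop head (→ `++class_set`,
                                 the next `while` head | the body), the front of the body (→ `at_10f260`, seven check sites), the sign
                                 test and the `b < 0` arm (→ the loop head with `i + 1`, `pcount + 1` | the call arm)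
      Seg4b                      THE CALL ARM: 0x10f141 … 0x10f1a3 + 0x10f290 … 0x10f297 (one check site, the call, `goto done`)
      Seg4.of_parts              Seg4a → Seg4b → Seg4 (both loops by strong induction on `PRD − pcount`)

      segment 6  (0x10f4ed … 0x10f69d)
      AtInner                    the invariant of the i-loop 2229 at its head 0x10f551 (`cut21`)
      AtTurn                     0x10f579 (`at_10f579`), the first instruction of the body proper, after the loop condition
      Seg6a                      three walks: the `while` head (At22 → DECODE #2 | the pass latch | the i-loop's entry; with the `idiv`),
                                 the i-loop's entry (At23 → the loop head with `i = 0`), the loop condition (→ `++class_set`, the next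
                                 `while` head | the body proper)
      Seg6b                      THE BODY PROPER: 0x10f579 … 0x10f634 + 0x10f4ed … 0x10f54d + 0x10f639 … 0x10f640 (eight check sites, the `b < 0` arm with its
                                 `idiv`, the call)
      Seg6.of_parts              Seg6a → Seg6b → Seg6

  Slots as in Vorbis/Spec/DecodeResidue.lean: `rbp = RA − 8`, so `[rbp − X]` is `[g.e.rsp − (X + 8)]`.
-/
import Vorbis.Spec.DecodeResidue
import Vorbis.Spec.DecodeResidueCarry
import Vorbis.LabelsAt
namespace Vorbis.Spec
open X86 X86.User Asan

namespace DecodeResidue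

/-! ### Segment 4: the assertions at 0x10f1a7, 0x10f1cf, 0x10f260, 0x10f141 -/

/-- **The invariant of the i-loop 2183 at the address `a`** (`ch = 2`): `a` = 0x10f1a7 (`L.decode_residue.cut14`, the loop head:
`mov eax, [rbp−0xc0]`) or 0x10f1cf (`L.decode_residue.at_10f1cf`, the first instruction of the body: between the two lie only
`cmp` / `setl` / `test` / `je`, which store nothing and write eax, esi, dl only). `InnerA` with a running `i` in r13d, `r` in r14. -/
structure AtIn (a : Word) (u₀ : State) (g : G) (pass cs i pcount : Nat) (v : State) : Prop where
  /-- at the address `a` -/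
  rip : v.rip = a
  /-- COMMON -/
  common : Common u₀ g v
  /-- this is the variant `ch = 2` -/
  ch2 : g.ch = 2
  /-- `r14 = r`, the residue record -/
  r14 : v.reg .r14 = UInt64.ofNat g.r
  /-- `r13d = i` (0x10f2e6 `mov r13d, 0`; the latch 0x10f19f `add r13d, 1`) -/
  r13 : v.reg .r13 = UInt64.ofNat i
  /-- path A: `rtype = 2`, `[rbp−0xa0] = pass`, `[rbp−0xdc] = tap`, `[rbp−0xc8] = n` -/
  path : PathA g pass v
  /-- `r15d = pcount` (the latch 0x10f1a3 `add r15d, 1`) -/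
  r15 : v.reg .r15 = UInt64.ofNat pcount
  /-- `[rbp−0xd8] = class_set` -/
  sl_cs : v.mem.readLE (g.e.reg .rsp - 224) 4 = cs
  /-- the invariant of the i-loop: `pcount = class_set·W + i`, the slot `class_set` of row 0 is filled -/
  wi : WInnerInv v.mem g.f g.r g.TB g.C g.PRD g.W g.rowsA pass cs i pcount
  /-- CI on `c_inter` (`[rbp−0x60]`), `p_inter` (`[rbp−0x50]`) -/
  inter : InterAt v.mem g.ci g.pi g.ch g.n

/-- **Inside the body of the i-loop 2183, `b` in ebx**: `a` = 0x10f260 (`L.decode_residue.at_10f260`: `test bx, 0x8000`, after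
`movzx ebx, WORD PTR [rbx + r12·2]` = `r->residue_books[c][pass]`) or 0x10f141 (`L.decode_residue.at_10f141`, the target of the `je`: the
call arm, bit 15 of `b` clear; nothing is stored between the two). The loop invariant with `i < classwords`, `pcount < part_read` (the
loop condition held); `[rbp−0xb8] = r->part_size` (stored at 0x10f1e7, read again by the call arm 0x10f16b and the `b < 0` arm
0x10f26b); `[rbp−0x98] = z = r->begin + pcount·part_size` (stored at 0x10f1f4, read by the `b < 0` arm 0x10f272); `ebx = b` as an
unsigned 16-bit value, and R8c for its signed reading: `b = −1` or a codebook number. -/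
structure AtB (a : Word) (u₀ : State) (g : G) (pass cs i pcount b : Nat) (v : State) : Prop where
  /-- the loop invariant, at the address `a` -/
  loop : AtIn a u₀ g pass cs i pcount v
  /-- `i < classwords` -/
  i_lt : i < g.W
  /-- `pcount < part_read` -/
  pc_lt : pcount < g.PRD
  /-- `[rbp−0xb8] = r->part_size` (the record's field as at the function's entry) -/
  sl_psz : v.mem.readLE (g.e.reg .rsp - 192) 4 = Residue.part_size g.e.mem g.r
  /-- `[rbp−0x98] = z(pcount) = begin + pcount·part_size` -/
  sl_z : v.mem.readLE (g.e.reg .rsp - 160) 4 = Residue.begin g.e.mem g.r + pcount * Residue.part_size g.e.mem g.r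
  /-- `rbx = b`, zero-extended from 16 bits -/
  rbx : v.reg .rbx = UInt64.ofNat b
  /-- `b` is a 16-bit value -/
  b_lt : b < 65536
  /-- R8c: `residue_books[c][pass]` is −1 or a codebook number -/
  book : sint16 b = -1 ∨ (0 ≤ sint16 b ∧ sint16 b < stb_vorbis.codebook_count v.mem g.f)

/-! ### Segment 4: the children's claims -/

/-- **decode_residue.4a** (0x10f19f … 0x10f28b + 0x10f29c … 0x10f2ec + 0x10f30c … 0x10f30f; C 2166–2169, 2183–2191, 2202–2208):
EVERYTHING OF SEGMENT 4 BUT THE CALL ARM, as five walks between the cut points.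
(1) The `while` head 0x10f2a3: `pcount ≥ part_read` → the pass latch; else `z`, `c_inter`, `p_inter` (two checks of the record; CI
by fact K) → DECODE #1 (pass 0) or the i-loop's entry (pass ≥ 1).
(2) The i-loop's entry 0x10f2e6 (`mov r13d, 0 ; jmp 10f1a7`): the loop invariant with `i = 0`.
(3) The loop head 0x10f1a7: `i ≥ classwords` or `pcount ≥ part_read` → `++class_set` (0x10f29c) and the next `while` head; else the
body at 0x10f1cf with nothing changed.
(4) The front of the body 0x10f1cf … 0x10f260: `z`, `c = part_classdata[0][class_set][i]`, `b = r->residue_books[c][pass]` (seven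
check sites).
(5) The sign test of `b` and the `b < 0` arm 0x10f260 … 0x10f28b, the latch 0x10f19f / 0x10f1a3: bit 15 clear → the call arm at
0x10f141 with nothing changed; bit 15 set → `z += part_size`, CI again, `++i, ++pcount`: the loop head. -/
def Seg4a (Lay : Layout) (μ : Microarch) (u₀ : State) : Prop :=
  ∀ g : G, Entered u₀ g →
    (∀ pass cs pcount v, At15 u₀ g pass cs pcount v →
      ReachVia Lay μ WayInv v (fun v' =>
        (pass = 0 ∧ pcount < g.PRD ∧ At10 u₀ g cs pcount v') ∨ (1 ≤ pass ∧ At16 u₀ g pass cs pcount v') ∨ At24 u₀ g pass v')) ∧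
    (∀ pass cs pcount v, At16 u₀ g pass cs pcount v →
      ReachVia Lay μ WayInv v (fun v' => AtIn L.decode_residue.cut14 u₀ g pass cs 0 pcount v')) ∧
    (∀ pass cs i pcount v, AtIn L.decode_residue.cut14 u₀ g pass cs i pcount v →
      ReachVia Lay μ WayInv v (fun v' =>
        ((g.W ≤ i ∨ g.PRD ≤ pcount) ∧ At15 u₀ g pass (cs + 1) pcount v') ∨
        (i < g.W ∧ pcount < g.PRD ∧ AtIn L.decode_residue.at_10f1cf u₀ g pass cs i pcount v'))) ∧
    (∀ pass cs i pcount v, i < g.W → pcount < g.PRD → AtIn L.decode_residue.at_10f1cf u₀ g pass cs i pcount v →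
      ReachVia Lay μ WayInv v (fun v' => ∃ b, AtB L.decode_residue.at_10f260 u₀ g pass cs i pcount b v')) ∧
    (∀ pass cs i pcount b v, AtB L.decode_residue.at_10f260 u₀ g pass cs i pcount b v →
      ReachVia Lay μ WayInv v (fun v' =>
        AtIn L.decode_residue.cut14 u₀ g pass cs (i + 1) (pcount + 1) v' ∨
        (b < 32768 ∧ AtB L.decode_residue.at_10f141 u₀ g pass cs i pcount b v')))

/-- **decode_residue.4b** (0x10f141 … 0x10f1a3 + 0x10f290 … 0x10f297; C 2192–2200): THE CALL ARM of the i-loop 2183, `b ≥ 0`: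
`book = f->codebooks + b` (one check site, 0x10f150: the load of `f->codebooks`; `movsx rsi, bx ; imul rsi, 0x848`), the two pushed
arguments `part_size`, `n`, the call of codebook_decode_deinterleave_repeat at 0x10f18e (`cut13` = 0x10f193 is its return address);
result 1: the latch `++i, ++pcount` and the loop head with CI again (`DeintPost.one`); result 0: `goto done` (0x10f290). `Common.same`
after the call: `Entered.same_through_deint` (Vorbis/Spec/DecodeResidueCarry.lean). -/
def Seg4b (Lay : Layout) (μ : Microarch) (u₀ : State) : Prop :=
  ∀ g : G, Entered u₀ g →
    ∀ pass cs i pcount b v, b < 32768 → AtB L.decode_residue.at_10f141 u₀ g pass cs i pcount b v →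
      ReachVia Lay μ WayInv v (fun v' =>
        AtIn L.decode_residue.cut14 u₀ g pass cs (i + 1) (pcount + 1) v' ∨ At32 u₀ g v')

/-! ### Segment 4: the composition -/

/-- **The i-loop 2183 from its head**, by strong induction on `PRD − pcount`: to the next `while` head with `W ≤ i ∨ PRD ≤ pcount`
(so a LARGER `pcount` than at the i-loop's entry), or to `done`. `hhead`: walk (3) of `Seg4a`; `hbody`: one turn of the body. -/
theorem Seg4.iloop_runs {Lay : Layout} {μ : Microarch} {u₀ : State} {g : G}
    (hhead : ∀ pass cs i pcount v, AtIn L.decode_residue.cut14 u₀ g pass cs i pcount v →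
      ReachVia Lay μ WayInv v (fun v' =>
        ((g.W ≤ i ∨ g.PRD ≤ pcount) ∧ At15 u₀ g pass (cs + 1) pcount v') ∨
        (i < g.W ∧ pcount < g.PRD ∧ AtIn L.decode_residue.at_10f1cf u₀ g pass cs i pcount v')))
    (hbody : ∀ pass cs i pcount v, i < g.W → pcount < g.PRD → AtIn L.decode_residue.at_10f1cf u₀ g pass cs i pcount v →
      ReachVia Lay μ WayInv v (fun v' =>
        AtIn L.decode_residue.cut14 u₀ g pass cs (i + 1) (pcount + 1) v' ∨ At32 u₀ g v'))
    (pass cs : Nat) :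
    ∀ (k i pcount : Nat) (v : State), g.PRD - pcount = k → AtIn L.decode_residue.cut14 u₀ g pass cs i pcount v →
      ReachVia Lay μ WayInv v (fun v' =>
        (∃ i' pcount', (g.W ≤ i' ∨ g.PRD ≤ pcount') ∧ pcount' = cs * g.W + i' ∧ At15 u₀ g pass (cs + 1) pcount' v') ∨
          At32 u₀ g v') := by
  intro k
  induction k using Nat.strongRecOn with
  | _ k ih =>
    intro i pcount v hk hat
    have hpe := hat.wi.inner.pcount_eq
    refine (hhead pass cs i pcount v hat).trans ?_
    intro v1 h1
    rcases h1 with ⟨hex, h15⟩ | ⟨hi, hp, hb⟩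
    · exact ReachVia.done (Or.inl ⟨i, pcount, hex, hpe, h15⟩)
    · refine (hbody pass cs i pcount v1 hi hp hb).trans ?_
      intro v2 h2
      rcases h2 with hn | h32
      · exact ih (g.PRD - (pcount + 1)) (by omega) (i + 1) (pcount + 1) v2 rfl hn
      · exact ReachVia.done (Or.inr h32)

/-- **The two entries of segment 4 from the `while` head's step and the whole i-loop**, by strong induction on `PRD − pcount` (the
measure of `while` 2166). `hhead`: walk (1) of `Seg4a`; `hinner`: from the i-loop's entry to the next `while` head with a LARGER
`pcount`, or `done`. -/
theorem Seg4.of_head_inner {Lay : Layout} {μ : Microarch} {u₀ : State} {g : G}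
    (hhead : ∀ pass cs pcount v, At15 u₀ g pass cs pcount v →
      ReachVia Lay μ WayInv v (fun v' =>
        (pass = 0 ∧ pcount < g.PRD ∧ At10 u₀ g cs pcount v') ∨ (1 ≤ pass ∧ At16 u₀ g pass cs pcount v') ∨ At24 u₀ g pass v'))
    (hinner : ∀ pass cs pcount v, At16 u₀ g pass cs pcount v →
      ReachVia Lay μ WayInv v (fun v' =>
        (∃ pcount', pcount < pcount' ∧ At15 u₀ g pass (cs + 1) pcount' v') ∨ At32 u₀ g v')) :
    (∀ pass cs pcount v, At15 u₀ g pass cs pcount v →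
      ReachVia Lay μ WayInv v (fun v' => (pass = 0 ∧ At10 u₀ g cs pcount v') ∨ At24 u₀ g pass v' ∨ At32 u₀ g v')) ∧
    (∀ pass cs pcount v, At16 u₀ g pass cs pcount v →
      ReachVia Lay μ WayInv v (fun v' =>
        (pass = 0 ∧ ∃ cs' pcount', pcount < pcount' ∧ At10 u₀ g cs' pcount' v') ∨ At24 u₀ g pass v' ∨ At32 u₀ g v')) := by
  -- entry 1, by strong induction on the measure
  have h15 : ∀ (k : Nat) (pass cs pcount : Nat) (v : State), g.PRD - pcount = k → At15 u₀ g pass cs pcount v →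
      ReachVia Lay μ WayInv v (fun v' => (pass = 0 ∧ At10 u₀ g cs pcount v') ∨ At24 u₀ g pass v' ∨ At32 u₀ g v') := by
    intro k
    induction k using Nat.strongRecOn with
    | _ k ih =>
      intro pass cs pcount v hk hat
      refine (hhead pass cs pcount v hat).trans ?_
      intro v1 h1
      rcases h1 with ⟨hp0, _, h10⟩ | ⟨hp1, h16⟩ | h24
      · exact ReachVia.done (Or.inl ⟨hp0, h10⟩)
      · -- pass ≥ 1: the i-loop, then the next head with a larger `pcount`
        have hlt : pcount < g.PRD := by
          have hi := h16.loop.wi.inner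
          have h1 := hi.pcount_eq
          have h2 := hi.start_lt
          omega
        refine (hinner pass cs pcount v1 h16).trans ?_
        intro v2 h2
        rcases h2 with ⟨pcount', hgt, h15'⟩ | h32
        · refine (ih (g.PRD - pcount') (by omega) pass (cs + 1) pcount' v2 rfl h15').mono ?_
          intro v3 h3
          rcases h3 with ⟨hp0, _⟩ | h | h
          · omega
          · exact Or.inr (Or.inl h)
          · exact Or.inr (Or.inr h)
        · exact ReachVia.done (Or.inr (Or.inr h32))
      · exact ReachVia.done (Or.inr (Or.inl h24))
  refine ⟨fun pass cs pcount v hat => h15 _ pass cs pcount v rfl hat, ?_⟩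
  -- entry 2: the i-loop, then entry 1 at the next head
  intro pass cs pcount v hat
  refine (hinner pass cs pcount v hat).trans ?_
  intro v2 h2
  rcases h2 with ⟨pcount', hgt, h15'⟩ | h32
  · refine (h15 _ pass (cs + 1) pcount' v2 rfl h15').mono ?_
    intro v3 h3
    rcases h3 with ⟨hp0, h10⟩ | h | h
    · exact Or.inl ⟨hp0, cs + 1, pcount', hgt, h10⟩
    · exact Or.inr (Or.inl h)
    · exact Or.inr (Or.inr h)
  · exact ReachVia.done (Or.inr (Or.inr h32))

/-- **Segment 4 from its two parts**: 4a = the five walks around the call arm, 4b = the call arm. -/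
theorem Seg4.of_parts {Lay : Layout} {μ : Microarch} {u₀ : State} (ha : Seg4a Lay μ u₀) (hb : Seg4b Lay μ u₀) :
    Seg4 Lay μ u₀ := by
  intro g hent
  obtain ⟨hhead, hentry, hihead, hfront, hneg⟩ := ha g hent
  have hcall := hb g hent
  -- one turn of the body: the front, the sign test, then the `b < 0` arm or the call arm
  have hbody : ∀ pass cs i pcount v, i < g.W → pcount < g.PRD → AtIn L.decode_residue.at_10f1cf u₀ g pass cs i pcount v →
      ReachVia Lay μ WayInv v (fun v' =>
        AtIn L.decode_residue.cut14 u₀ g pass cs (i + 1) (pcount + 1) v' ∨ At32 u₀ g v') := by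
    intro pass cs i pcount v hi hp hat
    refine (hfront pass cs i pcount v hi hp hat).trans ?_
    intro v1 h1
    obtain ⟨b, hb1⟩ := h1
    refine (hneg pass cs i pcount b v1 hb1).trans ?_
    intro v2 h2
    rcases h2 with hn | ⟨hb15, hcallat⟩
    · exact ReachVia.done (Or.inl hn)
    · exact hcall pass cs i pcount b v2 hb15 hcallat
  apply Seg4.of_head_inner hhead
  -- the i-loop from its entry
  intro pass cs pcount v hat
  have hW := hat.common.w_pos hent
  have hin0 := hat.loop.wi.inner
  refine (hentry pass cs pcount v hat).trans ?_
  intro v1 h1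
  refine (Seg4.iloop_runs hihead hbody pass cs _ 0 pcount v1 rfl h1).mono ?_
  intro v2 h2
  rcases h2 with ⟨i', pcount', hex, hpe, h15⟩ | h32
  · refine Or.inl ⟨pcount', ?_, h15⟩
    have h0 := hin0.pcount_eq
    have h1' := hin0.start_lt
    have hle := h15.loop.wa.head
    unfold Res.WHead at hle
    rcases hex with hw | hp
    · omega
    · omega
  · exact Or.inr h32

/-! ### Segment 6: the assertions at 0x10f551 and 0x10f579 -/

/-- **0x10f551 (`L.decode_residue.cut21`), the head of the i-loop 2229** (`ch > 2`; a cut INSIDE segment 6): `r13d = i`,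
`r15d = pcount`, `r12 = r`, `[rbp−0xd8] = class_set`, `WInnerInv … rowsA pass cs i pcount`, CI. Measure `PRD − pcount`. -/
structure AtInner (u₀ : State) (g : G) (pass cs i pcount : Nat) (v : State) : Prop where
  /-- at the loop head -/
  rip : v.rip = L.decode_residue.cut21
  /-- COMMON -/
  common : Common u₀ g v
  /-- this is the variant `ch > 2` -/
  ch3 : 3 ≤ g.ch
  /-- `r12 = r`, the residue record (r14 is scratch in this variant) -/
  r12 : v.reg .r12 = UInt64.ofNat g.r
  /-- path A: `rtype = 2`, `[rbp−0xa0] = pass`, `[rbp−0xdc] = tap`, `[rbp−0xc8] = n` -/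
  path : PathA g pass v
  /-- `r15d = pcount` -/
  r15 : v.reg .r15 = UInt64.ofNat pcount
  /-- `r13d = i` -/
  r13 : v.reg .r13 = UInt64.ofNat i
  /-- `[rbp−0xd8] = class_set` -/
  sl_cs : v.mem.readLE (g.e.reg .rsp - 224) 4 = cs
  /-- the invariant of the i-loop -/
  wi : WInnerInv v.mem g.f g.r g.TB g.C g.PRD g.W g.rowsA pass cs i pcount
  /-- CI on `c_inter`, `p_inter` -/
  inter : InterAt v.mem g.ci g.pi g.ch g.n

/-- **0x10f579 (`L.decode_residue.at_10f579`: `mov rdi, r12`, C 2230), the body proper of the i-loop 2229**: the loop condition held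
(`i < classwords`, `pcount < part_read`); everything of `AtInner` is still there (0x10f551 … 0x10f573 are `mov` / `cmp` / `setl` /
`test` / `je`: no store; eax, esi, dl written). -/
structure AtTurn (u₀ : State) (g : G) (pass cs i pcount : Nat) (v : State) : Prop where
  /-- at the first instruction of the body proper -/
  rip : v.rip = L.decode_residue.at_10f579
  /-- COMMON -/
  common : Common u₀ g v
  /-- this is the variant `ch > 2` -/
  ch3 : 3 ≤ g.ch
  /-- `r12 = r` -/
  r12 : v.reg .r12 = UInt64.ofNat g.r
  /-- path A -/
  path : PathA g pass v
  /-- `r15d = pcount` -/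
  r15 : v.reg .r15 = UInt64.ofNat pcount
  /-- `r13d = i` -/
  r13 : v.reg .r13 = UInt64.ofNat i
  /-- `[rbp−0xd8] = class_set` -/
  sl_cs : v.mem.readLE (g.e.reg .rsp - 224) 4 = cs
  /-- the invariant of the i-loop -/
  wi : WInnerInv v.mem g.f g.r g.TB g.C g.PRD g.W g.rowsA pass cs i pcount
  /-- CI on `c_inter`, `p_inter` -/
  inter : InterAt v.mem g.ci g.pi g.ch g.n
  /-- `i < classwords` -/
  i_lt : i < g.W
  /-- `pcount < part_read` -/
  lt : pcount < g.PRD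

/-! ### Segment 6: the children's claims -/

/-- **decode_residue.6a** (0x10f64c … 0x10f69d + 0x10f551 … 0x10f573 + 0x10f645 … 0x10f64b; C 2212–2215, 2229, 2248): three walks.
(1) The `while` head 0x10f64c: `pcount ≥ part_read` → the pass latch; else the two checked loads of `r->begin`, `r->part_size`,
`z = begin + pcount·part_size`, `cdq ; idiv ch` (no `#DE`), `c_inter := z % ch`, `p_inter := z / ch` → DECODE #2 (pass 0) or the
i-loop's entry (pass ≥ 1).
(2) The i-loop's entry 0x10f692 (`mov r13d, 0 ; jmp 10f551`): the loop invariant with `i = 0`.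
(3) The loop condition 0x10f551 … 0x10f573: `i ≥ classwords` or `pcount ≥ part_read` → `++class_set` (0x10f645) and the next
`while` head; else the body proper at 0x10f579 with nothing changed. -/
def Seg6a (Lay : Layout) (μ : Microarch) (u₀ : State) : Prop :=
  ∀ g : G, Entered u₀ g →
    (∀ pass cs pcount v, At22 u₀ g pass cs pcount v →
      ReachVia Lay μ WayInv v (fun v' =>
        (pass = 0 ∧ At17 u₀ g cs pcount v') ∨ At24 u₀ g pass v' ∨ (1 ≤ pass ∧ At23 u₀ g pass cs pcount v'))) ∧
    (∀ pass cs pcount v, At23 u₀ g pass cs pcount v →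
      ReachVia Lay μ WayInv v (fun v' => AtInner u₀ g pass cs 0 pcount v')) ∧
    (∀ pass cs i pcount v, AtInner u₀ g pass cs i pcount v →
      ReachVia Lay μ WayInv v (fun v' => At22 u₀ g pass (cs + 1) pcount v' ∨ AtTurn u₀ g pass cs i pcount v'))

/-- **decode_residue.6b** (0x10f579 … 0x10f634 + 0x10f4ed … 0x10f54d + 0x10f639 … 0x10f640; C 2230–2246): THE BODY PROPER of the i-loop 2229: `z`, the
class number `c` through `part_classdata[0][class_set][i]`, the book `b = r->residue_books[c][pass]` (seven check sites); `b ≥ 0`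
(0x10f4ed): `book = f->codebooks + b` (one check site), the call of codebook_decode_deinterleave_repeat at 0x10f538 (`cut20` =
0x10f53d is its return address; 1: CI again; 0: `done:` through 0x10f639); `b < 0`: `z += part_size`, `idiv ch` (0x10f628), CI; then `++i, ++pcount`
and the loop head. `Common.same` after the call: `Entered.same_through_deint`. -/
def Seg6b (Lay : Layout) (μ : Microarch) (u₀ : State) : Prop :=
  ∀ g : G, Entered u₀ g →
    ∀ pass cs i pcount v, AtTurn u₀ g pass cs i pcount v →
      ReachVia Lay μ WayInv v (fun v' => AtInner u₀ g pass cs (i + 1) (pcount + 1) v' ∨ At32 u₀ g v')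

/-! ### Segment 6: the composition -/

/-- **The i-loop 2229 from any turn**, by induction on `PRD − pcount`: to the `while` head with the next `class_set`, or `done:`.
`hb`: one turn (the loop condition, then the body proper). -/
theorem Seg6.inner_runs {Lay : Layout} {μ : Microarch} {u₀ : State} {g : G}
    (hb : ∀ pass cs i pcount v, AtInner u₀ g pass cs i pcount v →
      ReachVia Lay μ WayInv v (fun v' =>
        (pcount < g.PRD ∧ AtInner u₀ g pass cs (i + 1) (pcount + 1) v') ∨ At22 u₀ g pass (cs + 1) pcount v' ∨ At32 u₀ g v')) :
    ∀ n pass cs i pcount v, g.PRD - pcount ≤ n → AtInner u₀ g pass cs i pcount v →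
      ReachVia Lay μ WayInv v (fun v' => (∃ pc', At22 u₀ g pass (cs + 1) pc' v') ∨ At32 u₀ g v') := by
  intro n
  induction n with
  | zero =>
    intro pass cs i pcount v hn hv
    refine (hb pass cs i pcount v hv).trans ?_
    intro v' hv'
    rcases hv' with ⟨hlt, _⟩ | h | h
    · omega
    · exact ReachVia.done (Or.inl ⟨pcount, h⟩)
    · exact ReachVia.done (Or.inr h)
  | succ n ih =>
    intro pass cs i pcount v hn hv
    refine (hb pass cs i pcount v hv).trans ?_
    intro v' hv'
    rcases hv' with ⟨hlt, h⟩ | h | h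
    · exact ih pass cs (i + 1) (pcount + 1) v' (by omega) h
    · exact ReachVia.done (Or.inl ⟨pcount, h⟩)
    · exact ReachVia.done (Or.inr h)

/-- **Segment 6 from its two parts**: 6a = the `while` head, the i-loop's entry and the loop condition, 6b = the body proper. The
`while` 2212 by induction on `PRD − pcount`; a return to the `while` head comes with a larger `pcount` (R7b: `WHead` of
`class_set + 1` against `WInner` of `class_set`). -/
theorem Seg6.of_parts {Lay : Layout} {μ : Microarch} {u₀ : State} (ha : Seg6a Lay μ u₀) (hb : Seg6b Lay μ u₀) :
    Seg6 Lay μ u₀ := by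
  intro g hent
  obtain ⟨hhead, hinit, hcond⟩ := ha g hent
  have hproper := hb g hent
  -- one turn of the i-loop: the loop condition, then the body proper
  have hturn : ∀ pass cs i pcount v, AtInner u₀ g pass cs i pcount v →
      ReachVia Lay μ WayInv v (fun v' =>
        (pcount < g.PRD ∧ AtInner u₀ g pass cs (i + 1) (pcount + 1) v') ∨ At22 u₀ g pass (cs + 1) pcount v' ∨ At32 u₀ g v') := by
    intro pass cs i pcount v hv
    refine (hcond pass cs i pcount v hv).trans ?_
    intro v' hv'
    rcases hv' with h | h
    · exact ReachVia.done (Or.inr (Or.inl h))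
    · refine (hproper pass cs i pcount v' h).trans ?_
      intro v'' hv''
      rcases hv'' with h' | h'
      · exact ReachVia.done (Or.inl ⟨h.lt, h'⟩)
      · exact ReachVia.done (Or.inr (Or.inr h'))
  -- from before the i-loop to the next `while` head, with a larger `pcount`
  have h23 : ∀ pass cs pcount v, At23 u₀ g pass cs pcount v →
      ReachVia Lay μ WayInv v (fun v' => (∃ pc', pcount < pc' ∧ At22 u₀ g pass (cs + 1) pc' v') ∨ At32 u₀ g v') := by
    intro pass cs pcount v hv
    have hW := hv.common.w_pos hent
    have hin := hv.loop.wi.inner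
    refine (hinit pass cs pcount v hv).trans ?_
    intro v' hv'
    refine (Seg6.inner_runs hturn (g.PRD - pcount) pass cs 0 pcount v' (Nat.le_refl _) hv').trans ?_
    intro v'' hv''
    rcases hv'' with ⟨pc', h⟩ | h
    · refine ReachVia.done (Or.inl ⟨pc', ?_, h⟩)
      have hh := h.loop.wa.head
      have h1 := hin.pcount_eq
      have h2 := hin.start_lt
      have e : (cs + 1) * g.W = cs * g.W + g.W := Nat.succ_mul cs g.W
      unfold Res.WHead at hh
      omega
    · exact ReachVia.done (Or.inr h)
  -- the `while` head
  have h22 : ∀ n pass cs pcount v, g.PRD - pcount ≤ n → At22 u₀ g pass cs pcount v →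
      ReachVia Lay μ WayInv v (fun v' => (pass = 0 ∧ At17 u₀ g cs pcount v') ∨ At24 u₀ g pass v' ∨ At32 u₀ g v') := by
    intro n
    induction n with
    | zero =>
      intro pass cs pcount v hn hv
      refine (hhead pass cs pcount v hv).trans ?_
      intro v' hv'
      rcases hv' with h | h | ⟨hp, h⟩
      · exact ReachVia.done (Or.inl h)
      · exact ReachVia.done (Or.inr (Or.inl h))
      · have h2 := h.loop.wi.inner.start_lt
        have h1 := h.loop.wi.inner.pcount_eq
        omega
    | succ n ih =>
      intro pass cs pcount v hn hv
      refine (hhead pass cs pcount v hv).trans ?_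
      intro v' hv'
      rcases hv' with h | h | ⟨hp, h⟩
      · exact ReachVia.done (Or.inl h)
      · exact ReachVia.done (Or.inr (Or.inl h))
      · refine (h23 pass cs pcount v' h).trans ?_
        intro v'' hv''
        rcases hv'' with ⟨pc', hlt, h'⟩ | h'
        · refine (ih pass (cs + 1) pc' v'' (by omega) h').trans ?_
          intro v3 hv3
          rcases hv3 with ⟨h0, _⟩ | h3 | h3
          · omega
          · exact ReachVia.done (Or.inr (Or.inl h3))
          · exact ReachVia.done (Or.inr (Or.inr h3))
        · exact ReachVia.done (Or.inr (Or.inr h'))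
  constructor
  · intro pass cs pcount v hv
    exact h22 (g.PRD - pcount) pass cs pcount v (Nat.le_refl _) hv
  · intro pass cs pcount v hv
    refine (h23 pass cs pcount v hv).trans ?_
    intro v' hv'
    rcases hv' with ⟨pc', hlt, h'⟩ | h'
    · refine (h22 (g.PRD - pc') pass (cs + 1) pc' v' (Nat.le_refl _) h').trans ?_
      intro v'' hv''
      rcases hv'' with ⟨h0, h17⟩ | h3 | h3
      · exact ReachVia.done (Or.inl ⟨h0, cs + 1, pc', hlt, h17⟩)
      · exact ReachVia.done (Or.inr (Or.inl h3))
      · exact ReachVia.done (Or.inr (Or.inr h3))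
    · exact ReachVia.done (Or.inr (Or.inr h'))

end DecodeResidue

end Vorbis.Spec
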